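-- pv_equiv track=rewrite | github.com/scoky/data_tools | scripts/tab.py | glob
-- ===== SOURCE A (Python) =====
-- def glob(instream, header, rows_per_glob):
--    rows = []
--    if len(header) > 0:
--       rows.append(header)
--    for row in instream:
--       if len(rows) == rows_per_glob:
--          yield rows
--          rows = []
--       rows.append(row)
--    if len(rows) > 0:
--       yield rows
-- ===== SOURCE B (Python) =====
-- def glob(instream, header, rows_per_glob):
--     items = ([header] if len(header) > 0 else []) + list(instream)
--     cuts = [0] + list(range(rows_per_glob, len(items), rows_per_glob)) + [len(items)]
--     return [items[a:b] for a, b in zip(cuts, cuts[1:]) if items[a:b]]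
-- ===== Notes on version B (the rewrite author's own statement) =====
-- stated objective: alternative
-- what changed: B materialises header+rows into one list, computes the cut positions with range(rows_per_glob, len, rows_per_glob) and returns the nonempty slices between consecutive cuts, instead of A's per-row generator accumulation with a length-equality guard.
-- outside the precondition, e.g. on glob([['a']], [], 0): A returns [[], [['a']]], B raises ValueError
import Mathlib
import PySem

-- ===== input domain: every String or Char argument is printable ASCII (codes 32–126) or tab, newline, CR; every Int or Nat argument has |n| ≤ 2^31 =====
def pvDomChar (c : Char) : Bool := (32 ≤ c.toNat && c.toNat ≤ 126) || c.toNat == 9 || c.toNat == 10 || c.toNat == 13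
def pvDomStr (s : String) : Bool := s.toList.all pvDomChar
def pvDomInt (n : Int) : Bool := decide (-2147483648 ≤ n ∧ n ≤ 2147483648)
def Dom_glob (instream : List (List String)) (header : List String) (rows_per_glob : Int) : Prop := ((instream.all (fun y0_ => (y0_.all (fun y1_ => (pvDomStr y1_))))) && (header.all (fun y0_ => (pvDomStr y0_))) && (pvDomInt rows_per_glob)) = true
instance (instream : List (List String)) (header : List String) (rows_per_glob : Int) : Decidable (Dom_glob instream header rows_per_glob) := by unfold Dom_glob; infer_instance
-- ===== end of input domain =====

-- B slices the concatenated header+rows list between precomputed cut positions instead of A's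
-- per-row length-guarded accumulation; equivalence is about the returned list (A is a generator, listed).

-- ===== PORT A =====
-- loop body of A: if len(rows) == rows_per_glob: yield rows; rows = []  then rows.append(row)
def globStep (rows_per_glob : Int) (st : List (List (List String)) × List (List String)) (row : List String) : List (List (List String)) × List (List String) :=
  let st := if (st.2.length : Int) = rows_per_glob then (st.1 ++ [st.2], ([] : List (List String))) else st
  (st.1, st.2 ++ [row])

def glob (instream : List (List String)) (header : List String) (rows_per_glob : Int) : List (List (List String)) :=
  let rows : List (List String) := if header.length > 0 then [header] else []
  let st := instream.foldl (globStep rows_per_glob) ([], rows)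
  if st.2.length > 0 then st.1 ++ [st.2] else st.1

-- ===== PORT B =====
-- 'items[a:b] for … if items[a:b]' — keep the slice when it is nonempty (Python truthiness)
def globAltPick (items : List (List String)) (ab : Int × Int) : Option (List (List String)) :=
  let s := PySem.List.slice items (some ab.1) (some ab.2)
  if s.isEmpty then none else some s

def glob_alt (instream : List (List String)) (header : List String) (rows_per_glob : Int) : List (List (List String)) :=
  let items := (if header.length > 0 then [header] else []) ++ instream
  let cuts : List Int := [0] ++ PySem.List.pyRange rows_per_glob items.length rows_per_glob ++ [(items.length : Int)]
  (cuts.zip cuts.tail).filterMap (globAltPick items)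

-- ===== PRECONDITION & SPEC =====
-- Pre_ excludes only rows_per_glob = 0, where A's leading empty group is an accident of its
-- length-equality test and B's range(…, 0) raises ValueError.
def Pre_glob (instream : List (List String)) (header : List String) (rows_per_glob : Int) : Prop := rows_per_glob ≠ 0
instance (instream : List (List String)) (header : List String) (rows_per_glob : Int) : Decidable (Pre_glob instream header rows_per_glob) := by unfold Pre_glob; infer_instance

def pvWitness_glob : List (List String) × List String × Int := ([["a"], ["b"], ["c"]], ["h"], 2)

def Spec_glob (instream : List (List String)) (header : List String) (rows_per_glob : Int) (out : List (List (List String))) : Prop := out = glob_alt instream header rows_per_glob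
instance (instream : List (List String)) (header : List String) (rows_per_glob : Int) (out : List (List (List String))) : Decidable (Spec_glob instream header rows_per_glob out) := by unfold Spec_glob; infer_instance

-- ===== CLAIM (what is proved, stated in full; the proofs are below) =====
def Claim_equal_glob : Prop := ∀ (instream : List (List String)) (header : List String) (rows_per_glob : Int), Dom_glob instream header rows_per_glob → Pre_glob instream header rows_per_glob → Spec_glob instream header rows_per_glob (glob instream header rows_per_glob)

-- ===== LEMMAS AND PROOFS =====

-- groups of size K+1 (K+1 so the recursion is well-founded without a positivity hypothesis)
def pvChunks {α : Type} (K : Nat) : List α → List (List α)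
  | [] => []
  | x :: xs => ((x :: xs).take (K + 1)) :: pvChunks K ((x :: xs).drop (K + 1))
  termination_by l => l.length
  decreasing_by simp

@[simp] lemma pvChunks_nil {α : Type} (K : Nat) : pvChunks K ([] : List α) = [] := by
  unfold pvChunks
  rfl

lemma pvChunks_cons {α : Type} (K : Nat) (x : α) (xs : List α) :
    pvChunks K (x :: xs) = ((x :: xs).take (K + 1)) :: pvChunks K ((x :: xs).drop (K + 1)) := by
  rw [pvChunks]

-- consecutive pairs of a cut list
def pvCutPairs : Int → List Int → List (Int × Int)
  | _, [] => []
  | a, b :: t => (a, b) :: pvCutPairs b t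

lemma zip_tail_eq_cutPairs : ∀ (l : List Int) (a : Int), (a :: l).zip l = pvCutPairs a l := by
  intro l
  induction l with
  | nil => intro a; simp [pvCutPairs]
  | cons b t ih => intro a; simp [pvCutPairs, List.zip_cons_cons, ih b]

-- range(a, b, s) with positive step: empty when b ≤ a, else a followed by range(a+s, b, s)
lemma pyRange_pos_nil (a b s : Int) (hs : 0 < s) (h : b ≤ a) : PySem.List.pyRange a b s = [] := by
  rw [PySem.List.pyRange_of_pos a b hs, if_neg (by omega)]
  simp

lemma pyRange_pos_cons (a b s : Int) (hs : 0 < s) (hab : a < b) :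
    PySem.List.pyRange a b s = a :: PySem.List.pyRange (a + s) b s := by
  rw [PySem.List.pyRange_of_pos a b hs, PySem.List.pyRange_of_pos (a + s) b hs, if_pos hab]
  by_cases h2 : a + s < b
  · rw [if_pos h2]
    have hN : ((b - a + s - 1) / s).toNat = ((b - (a + s) + s - 1) / s).toNat + 1 := by
      have hx : b - a + s - 1 = (b - (a + s) + s - 1) + 1 * s := by ring
      have := Int.add_mul_ediv_right (b - (a + s) + s - 1) 1 (by omega : s ≠ 0)
      have hnn : 0 ≤ (b - (a + s) + s - 1) / s := Int.ediv_nonneg (by omega) (by omega)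
      rw [hx, this]
      omega
    rw [hN, List.range_succ_eq_map]
    simp only [List.map_cons, List.map_map]
    refine congrArg₂ List.cons (by ring) (List.map_congr_left ?_)
    intro x _
    simp only [Function.comp_apply]
    push_cast
    ring
  · rw [if_neg h2]
    have hx : b - a + s - 1 = (b - a - 1) + 1 * s := by ring
    have hdiv : (b - a - 1) / s = 0 := Int.ediv_eq_zero_of_lt (by omega) (by omega)
    have := Int.add_mul_ediv_right (b - a - 1) 1 (by omega : s ≠ 0)
    have hN : ((b - a + s - 1) / s).toNat = 1 := by rw [hx, this, hdiv]; rfl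
    rw [hN]
    simp

-- range(a, b, s) with negative step is empty when a ≤ b
lemma pyRange_neg_nil (a b s : Int) (hs : s < 0) (h : a ≤ b) : PySem.List.pyRange a b s = [] := by
  unfold PySem.List.pyRange
  rw [if_neg (by omega)]
  rw [if_neg (by omega), if_neg (by omega)]
  simp

-- B's cut-pair slicing computes the chunks of the not-yet-consumed suffix
lemma cutPairs_chunks (items : List (List String)) (k : Int) (hk : 1 ≤ k) :
    ∀ (m : Nat) (a : Int), 0 ≤ a → a ≤ (items.length : Int) →
      ((items.length : Int) - a).toNat ≤ m →
      List.filterMap (globAltPick items)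
        (pvCutPairs a (PySem.List.pyRange (a + k) items.length k ++ [(items.length : Int)]))
        = pvChunks (k.toNat - 1) (items.drop a.toNat) := by
  intro m
  induction m with
  | zero =>
    intro a ha han hm
    have hae : a = (items.length : Int) := by omega
    subst hae
    rw [pyRange_pos_nil _ _ _ (by omega) (by omega)]
    have hsl : PySem.List.slice items (some (items.length : Int)) (some (items.length : Int)) = [] := by
      rw [PySem.List.slice_toNat items (by omega) (by omega)]
      simp
    simp [pvCutPairs, globAltPick, hsl]
  | succ m ih =>
    intro a ha han hm
    by_cases hb : a + k < (items.length : Int)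
    · rw [pyRange_pos_cons _ _ _ (by omega) hb]
      have hsl : PySem.List.slice items (some a) (some (a + k)) = (items.drop a.toNat).take k.toNat := by
        rw [PySem.List.slice_toNat items ha (by omega)]
        congr 1; omega
      have hne : items.drop a.toNat ≠ [] := by
        intro h; have := List.drop_eq_nil_iff.mp h; omega
      obtain ⟨y, ys, hys⟩ := List.exists_cons_of_ne_nil hne
      obtain ⟨K', hK'⟩ : ∃ K', k.toNat = K' + 1 := ⟨k.toNat - 1, by omega⟩
      have hpick : globAltPick items (a, a + k) = some ((items.drop a.toNat).take k.toNat) := by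
        rw [globAltPick]
        simp only [hsl, hys, hK', List.take_succ_cons]
        rfl
      rw [List.cons_append, pvCutPairs, List.filterMap_cons, hpick,
        ih (a + k) (by omega) (by omega) (by omega)]
      have hdrop : items.drop (a + k).toNat = (items.drop a.toNat).drop k.toNat := by
        rw [List.drop_drop]; congr 1; omega
      have hK : k.toNat - 1 + 1 = k.toNat := by omega
      rw [hdrop, hys, pvChunks_cons, hK]
    · rw [pyRange_pos_nil _ _ _ (by omega) (by omega)]
      have hsl : PySem.List.slice items (some a) (some (items.length : Int)) = items.drop a.toNat := by
        rw [PySem.List.slice_toNat items ha (by omega)]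
        apply List.take_of_length_le
        simp
      rcases Nat.lt_or_ge a.toNat items.length with hlt | hge
      · have hne : items.drop a.toNat ≠ [] := by
          intro h; have := List.drop_eq_nil_iff.mp h; omega
        obtain ⟨y, ys, hys⟩ := List.exists_cons_of_ne_nil hne
        have hK : k.toNat - 1 + 1 = k.toNat := by omega
        have hlen : (y :: ys).length ≤ k.toNat := by
          have : (items.drop a.toNat).length = items.length - a.toNat := by simp
          rw [← hys]; omega
        have htake : (y :: ys).take (k.toNat - 1 + 1) = y :: ys := by
          apply List.take_of_length_le; omega
        have hdrop : (y :: ys).drop (k.toNat - 1 + 1) = [] := by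
          apply List.drop_eq_nil_of_le; omega
        simp [pvCutPairs, globAltPick, hsl, hys, pvChunks_cons, htake, hdrop]
      · have hnil : items.drop a.toNat = [] := List.drop_eq_nil_of_le hge
        simp [pvCutPairs, globAltPick, hsl, hnil]

-- feeding rows whose total count stays ≤ k only appends them to the pending group
lemma foldl_globStep_extend (k : Int) (hk : 1 ≤ k) :
    ∀ (acc2 : List (List String)) (l : List (List String)) (out : List (List (List String)))
      (pre : List (List String)), ((pre.length + acc2.length : Nat) : Int) ≤ k →
      List.foldl (globStep k) (out, pre) (acc2 ++ l) = List.foldl (globStep k) (out, pre ++ acc2) l := by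
  intro acc2
  induction acc2 with
  | nil => intro l out pre _; simp
  | cons a as ih =>
    intro l out pre h
    have hpre : ((pre.length : Nat) : Int) ≠ k := by simp at h ⊢; omega
    have hstep : globStep k (out, pre) a = (out, pre ++ [a]) := by
      simp [globStep, hpre]
    rw [List.cons_append, List.foldl_cons, hstep, ih l out (pre ++ [a]) (by simp at h ⊢; omega)]
    simp

-- with a negative group size the length-equality guard never fires: the loop only accumulates
lemma foldl_globStep_neg (k : Int) (hk : k < 0) :
    ∀ (l : List (List String)) (out : List (List (List String))) (pre : List (List String)),
      List.foldl (globStep k) (out, pre) l = (out, pre ++ l) := by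
  intro l
  induction l with
  | nil => intro out pre; simp
  | cons x xs ih =>
    intro out pre
    have hpre : ((pre.length : Nat) : Int) ≠ k := by omega
    have hstep : globStep k (out, pre) x = (out, pre ++ [x]) := by
      simp [globStep, hpre]
    rw [List.foldl_cons, hstep, ih]
    simp

-- A's loop + final flush computes the chunks (positive group size)
lemma foldl_globStep_chunks (k : Int) (hk : 1 ≤ k) :
    ∀ (n : Nat) (l : List (List String)) (out : List (List (List String))), l.length ≤ n →
      (let st := List.foldl (globStep k) (out, ([] : List (List String))) l
       if st.2.length > 0 then st.1 ++ [st.2] else st.1) = out ++ pvChunks (k.toNat - 1) l := by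
  intro n
  induction n with
  | zero =>
    intro l out hl
    have : l = [] := List.eq_nil_of_length_eq_zero (by omega)
    subst this; simp
  | succ n ih =>
    intro l out hl
    rcases l with _ | ⟨x, xs⟩
    · simp
    · by_cases hlen : ((x :: xs).length : Int) ≤ k
      · have := foldl_globStep_extend k hk (x :: xs) [] out [] (by simpa using hlen)
        simp only [List.append_nil, List.nil_append, List.foldl_nil] at this
        rw [this]
        have htake : (x :: xs).take (k.toNat - 1 + 1) = x :: xs := by
          apply List.take_of_length_le; simp at hlen ⊢; omega
        have hdrop : (x :: xs).drop (k.toNat - 1 + 1) = [] := by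
          apply List.drop_eq_nil_of_le; simp at hlen ⊢; omega
        simp [pvChunks_cons, htake, hdrop]
      · -- more than k elements: the first k form a full group, then the loop restarts empty
        rw [not_le] at hlen
        set K := k.toNat with hKdef
        have hKl : K < (x :: xs).length := by simp at hlen ⊢; omega
        have hsplit : (x :: xs).take K ++ (x :: xs).drop K = x :: xs := List.take_append_drop K (x :: xs)
        have htl : ((x :: xs).take K).length = K := by
          rw [List.length_take]; omega
        have h1 : List.foldl (globStep k) (out, ([] : List (List String))) (x :: xs)
            = List.foldl (globStep k) (out, (x :: xs).take K) ((x :: xs).drop K) := by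
          conv_lhs => rw [← hsplit]
          rw [foldl_globStep_extend k hk ((x :: xs).take K) ((x :: xs).drop K) out [] (by simp [htl]; omega)]
          simp
        have hne : (x :: xs).drop K ≠ [] := by
          intro h; have := List.drop_eq_nil_iff.mp h; omega
        obtain ⟨y, ys, hys⟩ := List.exists_cons_of_ne_nil hne
        have hKk : ((K : Nat) : Int) = k := by omega
        have hstep1 : globStep k (out, (x :: xs).take K) y = (out ++ [(x :: xs).take K], [y]) := by
          simp [globStep, htl, hKk]
        have h0k : ¬ ((0 : Int) = k) := by omega
        have hstep2 : globStep k (out ++ [(x :: xs).take K], ([] : List (List String))) y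
            = (out ++ [(x :: xs).take K], [y]) := by
          simp [globStep, h0k]
        have h2 : List.foldl (globStep k) (out, (x :: xs).take K) ((x :: xs).drop K)
            = List.foldl (globStep k) (out ++ [(x :: xs).take K], ([] : List (List String))) ((x :: xs).drop K) := by
          rw [hys, List.foldl_cons, List.foldl_cons, hstep1, hstep2]
        have hdl : ((x :: xs).drop K).length ≤ n := by
          rw [List.length_drop]; simp at hl ⊢; omega
        have h3 := ih ((x :: xs).drop K) (out ++ [(x :: xs).take K]) hdl
        simp only [h1, h2]
        rw [h3]
        have hK : K - 1 + 1 = K := by omega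
        rw [pvChunks_cons, hK]
        simp

-- ===== VERDICT (by name: the statement is the Claim_ definition above) =====
theorem glob_spec : Claim_equal_glob := by
  intro instream header k _ hk
  unfold Spec_glob glob glob_alt
  replace hk : k ≠ 0 := hk
  dsimp only
  simp only [List.cons_append, List.nil_append, List.tail_cons]
  set rows0 : List (List String) := if header.length > 0 then [header] else [] with hrows0
  set items : List (List String) := rows0 ++ instream with hitems
  have hcuts : (((0 : Int) :: (PySem.List.pyRange k items.length k ++ [(items.length : Int)])).zip
      (PySem.List.pyRange k items.length k ++ [(items.length : Int)]))
      = pvCutPairs 0 (PySem.List.pyRange k items.length k ++ [(items.length : Int)]) :=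
    zip_tail_eq_cutPairs _ 0
  rcases (by omega : k < 0 ∨ 1 ≤ k) with hneg | hpos
  · -- negative group size: A accumulates everything; B has no interior cuts
    have hA := foldl_globStep_neg k hneg instream ([]) rows0
    have hrange : PySem.List.pyRange k items.length k = [] :=
      pyRange_neg_nil _ _ _ hneg (by omega)
    have hsl : PySem.List.slice items (some 0) (some (items.length : Int)) = items := by
      rw [PySem.List.slice_toNat items (by omega) (by omega)]
      simp
    have hB : List.filterMap (globAltPick items)
        (pvCutPairs 0 (PySem.List.pyRange k items.length k ++ [(items.length : Int)]))
        = if items.length > 0 then [items] else [] := by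
      rw [hrange]
      by_cases hnil : items = []
      · simp [pvCutPairs, globAltPick, hnil, PySem.List.slice]
      · have : ¬ items.isEmpty := by simp [List.isEmpty_iff, hnil]
        simp [pvCutPairs, globAltPick, hsl, this, List.length_pos_iff, hnil]
    rw [hcuts, hB, hA]
    by_cases hnil : items = []
    · simp [← hitems, hnil]
    · have : 0 < items.length := List.length_pos_of_ne_nil hnil
      simp [← hitems, this]
  · -- positive group size: both sides compute the chunk list
    have hr0 : ((rows0.length : Nat) : Int) ≤ k := by
      rw [hrows0]; split <;> simp <;> omega
    have hA : List.foldl (globStep k) (([] : List (List (List String))), rows0) instream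
        = List.foldl (globStep k) (([] : List (List (List String))), ([] : List (List String))) items := by
      rw [hitems, foldl_globStep_extend k hpos rows0 instream [] [] (by simpa using hr0)]
      simp
    have hAc := foldl_globStep_chunks k hpos items.length items [] le_rfl
    have hB := cutPairs_chunks items k hpos items.length 0 (by omega) (by omega) (by omega)
    rw [zero_add] at hB
    simp only at hAc
    rw [hcuts, hB, hA, hAc]
    simp
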